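-- pv_equiv track=rewrite | github.com/sublime-security/technical-solutions-temp | sublime-migration-cli/src/sublime_migration_cli/utils/filtering.py | filter_by_types
-- ===== SOURCE A (Python) =====
-- from typing import Any, Callable, Dict, List, Optional, Set, Union
--
-- def filter_by_types(items: List[Dict],
--                    include_types: Optional[str] = None,
--                    exclude_types: Optional[str] = None,
--                    ignored_types: Optional[Set[str]] = None,
--                    type_field: str = "type") -> List[Dict]:
--     """
--     Filter a list of items by type.
--
--     Args:
--         items: List of items to filter
--         include_types: Comma-separated list of types to include
--         exclude_types: Comma-separated list of types to exclude
--         ignored_types: Set of types to always exclude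
--         type_field: Field name containing the type in each item
--
--     Returns:
--         List[Dict]: Filtered items
--     """
--     # First, exclude ignored types if specified
--     filtered = items
--     if ignored_types:
--         filtered = [item for item in filtered if item.get(type_field) not in ignored_types]
--
--     # Filter by included types if specified
--     if include_types:
--         types = set(t.strip() for t in include_types.split(","))
--         filtered = [item for item in filtered if item.get(type_field) in types]
--
--     # Filter by excluded types if specified
--     if exclude_types:
--         types = set(t.strip() for t in exclude_types.split(","))
--         filtered = [item for item in filtered if item.get(type_field) not in types]
--
--     return filtered
-- ===== SOURCE B (Python) =====
-- from typing import Any, Callable, Dict, List, Optional, Set, Union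
--
-- def filter_by_types(items: List[Dict],
--                    include_types: Optional[str] = None,
--                    exclude_types: Optional[str] = None,
--                    ignored_types: Optional[Set[str]] = None,
--                    type_field: str = "type") -> List[Dict]:
--     # Parse the comma-separated filter strings once (only when truthy, like A's guards).
--     inc = set(t.strip() for t in include_types.split(",")) if include_types else None
--     exc = set(t.strip() for t in exclude_types.split(",")) if exclude_types else None
--
--     def allowed(t):
--         if ignored_types and t in ignored_types:
--             return False
--         if inc is not None and t not in inc:
--             return False
--         return not (exc is not None and t in exc)
--
--     # Memo table: decide each distinct type value exactly once.
--     verdict = {}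
--     for item in items:
--         t = item.get(type_field)
--         if t not in verdict:
--             verdict[t] = allowed(t)
--
--     return [item for item in items if verdict[item.get(type_field)]]
-- ===== Notes on version B (the rewrite author's own statement) =====
-- stated objective: alternative
-- what changed: A applies up to three sequential list-comprehension filter passes over the item list; B instead builds a memo table mapping each distinct type value to a single keep/drop verdict (computed once per type), and then filters the items by a table lookup.
import Mathlib
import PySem

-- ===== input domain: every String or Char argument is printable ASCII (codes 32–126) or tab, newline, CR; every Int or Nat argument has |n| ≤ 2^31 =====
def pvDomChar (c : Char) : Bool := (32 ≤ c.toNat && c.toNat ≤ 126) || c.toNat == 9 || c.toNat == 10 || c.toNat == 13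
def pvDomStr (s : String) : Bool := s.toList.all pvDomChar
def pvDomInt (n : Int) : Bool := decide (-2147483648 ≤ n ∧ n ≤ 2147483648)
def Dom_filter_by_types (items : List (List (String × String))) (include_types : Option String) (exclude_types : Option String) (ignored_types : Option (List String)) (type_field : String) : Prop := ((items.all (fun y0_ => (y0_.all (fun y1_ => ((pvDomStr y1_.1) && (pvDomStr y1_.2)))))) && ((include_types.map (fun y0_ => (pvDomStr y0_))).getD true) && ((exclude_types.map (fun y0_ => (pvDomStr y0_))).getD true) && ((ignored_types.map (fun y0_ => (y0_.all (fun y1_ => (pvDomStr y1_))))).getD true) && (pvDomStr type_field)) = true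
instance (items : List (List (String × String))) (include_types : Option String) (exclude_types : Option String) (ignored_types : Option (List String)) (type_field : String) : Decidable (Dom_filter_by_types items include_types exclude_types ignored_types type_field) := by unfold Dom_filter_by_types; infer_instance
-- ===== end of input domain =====

-- B replaces A's up-to-three sequential filter passes by a memo table that decides each
-- distinct type value once, then one lookup pass (objective: alternative algorithm/data structure).

-- ===== PORT A =====
-- item.get(type_field): first-match lookup in the association list (Python dict)
def pvGetField (item : List (String × String)) (tf : String) : Option String :=
  (PySem.Dict.mk item).get? tf

-- 'o in ts' where o is item.get(...): None is never equal to a string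
def pvOptIn (o : Option String) (ts : List String) : Bool :=
  match o with
  | some t => ts.contains t
  | none => false

-- set(t.strip() for t in s.split(","))
def pvParseTypes (s : String) : List String :=
  PySem.Set.ofList ((( (PySem.Str.split? s ",").getD [] ).map PySem.Str.strip))

def filter_by_types (items : List (List (String × String))) (include_types : Option String) (exclude_types : Option String) (ignored_types : Option (List String)) (type_field : String) : List (List (String × String)) :=
  let filtered := items
  let filtered := match ignored_types with
    | some ig => if ig.isEmpty then filtered
        else filtered.filter (fun item => !pvOptIn (pvGetField item type_field) ig)
    | none => filtered
  let filtered := match include_types with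
    | some s => if s = "" then filtered
        else
          let types := pvParseTypes s
          filtered.filter (fun item => pvOptIn (pvGetField item type_field) types)
    | none => filtered
  let filtered := match exclude_types with
    | some s => if s = "" then filtered
        else
          let types := pvParseTypes s
          filtered.filter (fun item => !pvOptIn (pvGetField item type_field) types)
    | none => filtered
  filtered

-- ===== PORT B =====
-- B's helper allowed(t): early-return chain over the active conditions
def pvAllowed (ign : Option (List String)) (inc exc : Option (List String)) (t : Option String) : Bool :=
  if (match ign with | some g => !g.isEmpty && pvOptIn t g | none => false) then false
  else if (match inc with | some s => !(pvOptIn t s) | none => false) then false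
  else !(match exc with | some s => pvOptIn t s | none => false)

def filter_by_types_alt (items : List (List (String × String))) (include_types : Option String) (exclude_types : Option String) (ignored_types : Option (List String)) (type_field : String) : List (List (String × String)) :=
  let inc : Option (List String) := match include_types with
    | some s => if s = "" then none else some (pvParseTypes s)
    | none => none
  let exc : Option (List String) := match exclude_types with
    | some s => if s = "" then none else some (pvParseTypes s)
    | none => none
  -- memo table: each distinct type value decided once
  let verdict : PySem.Dict (Option String) Bool := items.foldl (fun d item =>
      let t := pvGetField item type_field
      if d.contains t then d else d.insert t (pvAllowed ignored_types inc exc t)) PySem.Dict.empty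
  -- verdict[item.get(type_field)]: the key is always present (inserted in the build loop),
  -- so Python's raising lookup is getD false here
  items.filter (fun item => (verdict.get? (pvGetField item type_field)).getD false)

-- ===== PRECONDITION & SPEC =====
def Spec_filter_by_types (items : List (List (String × String))) (include_types : Option String) (exclude_types : Option String) (ignored_types : Option (List String)) (type_field : String) (out : List (List (String × String))) : Prop := out = filter_by_types_alt items include_types exclude_types ignored_types type_field
instance (items : List (List (String × String))) (include_types : Option String) (exclude_types : Option String) (ignored_types : Option (List String)) (type_field : String) (out : List (List (String × String))) : Decidable (Spec_filter_by_types items include_types exclude_types ignored_types type_field out) := by unfold Spec_filter_by_types; infer_instance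

-- ===== CLAIM =====
def Claim_equal_filter_by_types : Prop := ∀ (items : List (List (String × String))) (include_types : Option String) (exclude_types : Option String) (ignored_types : Option (List String)) (type_field : String), Dom_filter_by_types items include_types exclude_types ignored_types type_field → Spec_filter_by_types items include_types exclude_types ignored_types type_field (filter_by_types items include_types exclude_types ignored_types type_field)

-- ===== LEMMAS AND PROOFS =====

-- The memo-table build loop: every binding records f of its key, keys stay present,
-- and every processed item's key is present.
lemma verdict_table_spec (f : Option String → Bool) (k : List (String × String) → Option String) :
    ∀ (l : List (List (String × String))) (d : PySem.Dict (Option String) Bool),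
      (∀ t b, d.get? t = some b → b = f t) →
      (∀ t b, (l.foldl (fun d item =>
          if d.contains (k item) then d else d.insert (k item) (f (k item))) d).get? t = some b → b = f t)
      ∧ (∀ t, (d.get? t).isSome → ((l.foldl (fun d item =>
          if d.contains (k item) then d else d.insert (k item) (f (k item))) d).get? t).isSome)
      ∧ (∀ x ∈ l, ((l.foldl (fun d item =>
          if d.contains (k item) then d else d.insert (k item) (f (k item))) d).get? (k x)).isSome) := by
  intro l
  induction l with
  | nil => intro d hd; exact ⟨hd, fun t h => h, by simp⟩
  | cons a rest ih =>
    intro d hd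
    simp only [List.foldl_cons]
    set d' := if d.contains (k a) then d else d.insert (k a) (f (k a)) with hd'
    have hcorr : ∀ t b, d'.get? t = some b → b = f t := by
      intro t b h
      rw [hd'] at h
      split at h
      · exact hd t b h
      · rw [PySem.Dict.get?_insert] at h
        split at h
        next ht => cases h; rw [ht]
        next => exact hd t b h
    have hmono : ∀ t, (d.get? t).isSome → (d'.get? t).isSome := by
      intro t h
      rw [hd']
      split
      · exact h
      · rw [PySem.Dict.get?_insert]; split <;> simp [h]
    have hka : (d'.get? (k a)).isSome := by
      rw [hd']
      split
      · rename_i h; rw [PySem.Dict.contains_eq_isSome_get?] at h; exact h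
      · rw [PySem.Dict.get?_insert_self]; rfl
    obtain ⟨c1, c2, c3⟩ := ih d' hcorr
    refine ⟨c1, fun t h => c2 t (hmono t h), ?_⟩
    intro x hx
    rcases List.mem_cons.mp hx with rfl | hx
    · exact c2 _ hka
    · exact c3 x hx

-- B's lookup pass is the filter by the verdict function f
lemma alt_filter_eq (f : Option String → Bool) (items : List (List (String × String))) (tf : String) :
    (items.filter (fun item =>
      (((items.foldl (fun d item =>
          if d.contains (pvGetField item tf) then d
          else d.insert (pvGetField item tf) (f (pvGetField item tf))) PySem.Dict.empty).get?
        (pvGetField item tf)).getD false)))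
    = items.filter (fun item => f (pvGetField item tf)) := by
  obtain ⟨c1, _, c3⟩ := verdict_table_spec f (fun item => pvGetField item tf) items PySem.Dict.empty
    (by intro t b h; simp [PySem.Dict.get?_empty] at h)
  apply List.filter_congr
  intro x hx
  have h3 := c3 x hx
  cases hsome : ((items.foldl (fun d item =>
      if d.contains (pvGetField item tf) then d else d.insert (pvGetField item tf) (f (pvGetField item tf)))
      PySem.Dict.empty).get? (pvGetField x tf)) with
  | none => simp [hsome] at h3
  | some b =>
    have := c1 _ b hsome
    simp only [Option.getD_some, this]

-- A's staged filters equal the filter by B's combined verdict pvAllowed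
lemma a_eq_filter_allowed (items : List (List (String × String))) (include_types exclude_types : Option String) (ignored_types : Option (List String)) (tf : String) :
    filter_by_types items include_types exclude_types ignored_types tf
    = items.filter (fun item => pvAllowed ignored_types
        (match include_types with | some s => if s = "" then none else some (pvParseTypes s) | none => none)
        (match exclude_types with | some s => if s = "" then none else some (pvParseTypes s) | none => none)
        (pvGetField item tf)) := by
  unfold filter_by_types
  cases ignored_types with
  | none =>
    cases include_types with
    | none =>
      cases exclude_types with
      | none => simp [pvAllowed]
      | some e => by_cases he : e = "" <;> simp [pvAllowed, he]
    | some i =>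
      by_cases hi : i = "" <;>
      cases exclude_types with
      | none => simp [pvAllowed, hi]
      | some e =>
        by_cases he : e = "" <;>
          simp [pvAllowed, hi, he, List.filter_filter] <;>
          exact List.filter_congr (fun x _ => by
            cases pvOptIn (pvGetField x tf) (pvParseTypes i) <;>
            cases pvOptIn (pvGetField x tf) (pvParseTypes e) <;> rfl)
  | some g =>
    by_cases hg : g.isEmpty <;>
    cases include_types with
    | none =>
      cases exclude_types with
      | none => simp [pvAllowed, hg]
      | some e =>
        by_cases he : e = "" <;>
          simp [pvAllowed, hg, he, List.filter_filter] <;>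
          exact List.filter_congr (fun x _ => by
            cases pvOptIn (pvGetField x tf) g <;>
            cases pvOptIn (pvGetField x tf) (pvParseTypes e) <;> rfl)
    | some i =>
      by_cases hi : i = "" <;>
      cases exclude_types with
      | none =>
        simp [pvAllowed, hg, hi, List.filter_filter]
        try exact List.filter_congr (fun x _ => by
          cases pvOptIn (pvGetField x tf) g <;>
          cases pvOptIn (pvGetField x tf) (pvParseTypes i) <;> rfl)
      | some e =>
        by_cases he : e = "" <;>
          simp [pvAllowed, hg, hi, he, List.filter_filter] <;>
          try exact List.filter_congr (fun x _ => by
            cases pvOptIn (pvGetField x tf) g <;>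
            cases pvOptIn (pvGetField x tf) (pvParseTypes i) <;>
            cases pvOptIn (pvGetField x tf) (pvParseTypes e) <;> rfl)

-- ===== VERDICT =====
theorem filter_by_types_spec : Claim_equal_filter_by_types := by
  intro items include_types exclude_types ignored_types type_field _
  simp only [Spec_filter_by_types, filter_by_types_alt]
  rw [a_eq_filter_allowed, alt_filter_eq]
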